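-- pv_equiv track=rewrite | github.com/yingl/LintCodeInPython | text-compression.py | textCompression
-- ===== SOURCE A (Python) =====
-- def textCompression(lines):
--     # write your code here.
--     ret = []
--     di = {}
--     i = 1
--     for line in lines:
--         _ret = []
--         word = ''
--         for c in line:
--             if ((c >= 'a') and (c <= 'z')) or ((c >= 'A') and (c <= 'Z')):
--                 word += c
--             else:
--                 if word:
--                     if word in di:
--                         _ret.append(str(di[word]))
--                     else:
--                         _ret.append(word)
--                         di[word] = i
--                         i += 1
--                     word = ''
--                 _ret.append(c)
--         if word: # 只有一个单词
--             if word in di: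
--                 _ret.append(str(di[word]))
--             else:
--                 _ret.append(word)
--                 di[word] = i
--                 i += 1
--             word = ''
--         ret.append(''.join(_ret))
--     return ret
-- ===== SOURCE B (Python) =====
-- def textCompression(lines):
--     di = {}
--
--     def tokens(line):
--         # maximal runs of ASCII letters, or single non-letter characters
--         j, n = 0, len(line)
--         while j < n:
--             c = line[j]
--             if ('a' <= c <= 'z') or ('A' <= c <= 'Z'):
--                 k = j + 1
--                 while k < n and (('a' <= line[k] <= 'z') or ('A' <= line[k] <= 'Z')):
--                     k += 1
--                 yield line[j:k]
--                 j = k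
--             else:
--                 yield c
--                 j += 1
--
--     def enc(tok):
--         if ('a' <= tok[0] <= 'z') or ('A' <= tok[0] <= 'Z'):
--             if tok in di:
--                 return str(di[tok])
--             di[tok] = len(di) + 1
--             return tok
--         return tok
--
--     return [''.join(enc(t) for t in tokens(line)) for line in lines]
-- ===== Notes on version B (the rewrite author's own statement) =====
-- stated objective: alternative
-- what changed: A's per-character state machine (accumulating a pending word and flushing it on each non-letter) is replaced by a tokenize-then-map pass: each line is split into maximal letter runs and single non-letter characters, and one shared dict (ids = len(di)+1) is threaded over the tokens.
import Mathlib
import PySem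

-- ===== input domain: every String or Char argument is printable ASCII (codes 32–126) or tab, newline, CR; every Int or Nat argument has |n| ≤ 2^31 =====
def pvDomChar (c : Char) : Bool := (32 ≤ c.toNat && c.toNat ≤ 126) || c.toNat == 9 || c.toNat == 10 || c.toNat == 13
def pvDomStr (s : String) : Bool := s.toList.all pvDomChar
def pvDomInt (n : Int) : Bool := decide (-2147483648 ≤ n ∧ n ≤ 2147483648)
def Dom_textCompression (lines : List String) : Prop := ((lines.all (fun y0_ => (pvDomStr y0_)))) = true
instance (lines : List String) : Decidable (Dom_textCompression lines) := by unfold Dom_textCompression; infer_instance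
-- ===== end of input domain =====

-- B replaces A's per-character accumulator loop by a tokenize-then-map pass
-- (maximal letter runs as tokens, one shared dict threaded over the tokens); objective: alternative.

def tcIsLet (c : Char) : Bool := ('a' ≤ c && c ≤ 'z') || ('A' ≤ c && c ≤ 'Z')

-- ===== PORT A =====
-- inner per-line loop of A: state (_ret pieces, pending word, dict, counter)
def tcLineA : List Char → List (List Char) → List Char → PySem.Dict (List Char) Int → Int →
    List (List Char) × PySem.Dict (List Char) Int × Int
  | [], r, w, di, i =>
    if w ≠ [] then
      match di.get? w with
      | some v => (r ++ [(PySem.Int.toStr v).toList], di, i)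
      | none => (r ++ [w], di.insert w i, i + 1)
    else (r, di, i)
  | c :: cs, r, w, di, i =>
    if tcIsLet c then tcLineA cs r (w ++ [c]) di i
    else
      if w ≠ [] then
        match di.get? w with
        | some v => tcLineA cs (r ++ [(PySem.Int.toStr v).toList, [c]]) [] di i
        | none => tcLineA cs (r ++ [w, [c]]) [] (di.insert w i) (i + 1)
      else tcLineA cs (r ++ [[c]]) [] di i

def tcLinesA : List (List Char) → PySem.Dict (List Char) Int → Int → List (List Char)
  | [], _, _ => []
  | l :: ls, di, i =>
    let (r, di', i') := tcLineA l [] [] di i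
    r.flatten :: tcLinesA ls di' i'

def textCompression (lines : List String) : List String :=
  (tcLinesA (lines.map String.toList) PySem.Dict.empty 1).map String.ofList

-- ===== PORT B =====
-- B's tokenizer: maximal runs of letters, single non-letter characters
def tcTokens : List Char → List (List Char)
  | [] => []
  | c :: cs =>
    if h : tcIsLet c then
      ((c :: cs).takeWhile tcIsLet) :: tcTokens ((c :: cs).dropWhile tcIsLet)
    else [c] :: tcTokens cs
  termination_by l => l.length
  decreasing_by
    · rw [List.dropWhile_cons_of_pos h]
      exact Nat.lt_succ_of_le (List.length_dropWhile_le _ _)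
    · simp

-- B's enc, threaded over the token list (dict shared across lines, ids are len(di)+1)
def tcEnc : List (List Char) → PySem.Dict (List Char) Int →
    List (List Char) × PySem.Dict (List Char) Int
  | [], di => ([], di)
  | t :: ts, di =>
    if tcIsLet (t.headD ' ') then
      match di.get? t with
      | some v =>
        let (us, di') := tcEnc ts di
        ((PySem.Int.toStr v).toList :: us, di')
      | none =>
        let (us, di') := tcEnc ts (di.insert t (di.size + 1))
        (t :: us, di')
    else
      let (us, di') := tcEnc ts di
      (t :: us, di')

def tcLinesB : List (List Char) → PySem.Dict (List Char) Int → List (List Char)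
  | [], _ => []
  | l :: ls, di =>
    let (us, di') := tcEnc (tcTokens l) di
    us.flatten :: tcLinesB ls di'

def textCompression_alt (lines : List String) : List String :=
  (tcLinesB (lines.map String.toList) PySem.Dict.empty).map String.ofList

-- ===== PRECONDITION & SPEC =====
def Spec_textCompression (lines : List String) (out : List String) : Prop := out = textCompression_alt lines
instance (lines : List String) (out : List String) : Decidable (Spec_textCompression lines out) := by unfold Spec_textCompression; infer_instance

-- ===== CLAIM (what is proved, stated in full; the proofs are below) =====
def Claim_equal_textCompression : Prop := ∀ (lines : List String), Dom_textCompression lines → Spec_textCompression lines (textCompression lines)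

-- ===== LEMMAS AND PROOFS =====

theorem tcTokens_nil : tcTokens [] = [] := by rw [tcTokens.eq_def]

theorem tcTokens_cons_pos (c : Char) (cs : List Char) (h : tcIsLet c = true) :
    tcTokens (c :: cs) =
      ((c :: cs).takeWhile tcIsLet) :: tcTokens ((c :: cs).dropWhile tcIsLet) := by
  rw [tcTokens.eq_def]; simp [h]

theorem tcTokens_cons_neg (c : Char) (cs : List Char) (h : tcIsLet c = false) :
    tcTokens (c :: cs) = [c] :: tcTokens cs := by
  rw [tcTokens.eq_def]; simp [h]

theorem takeWhile_all_append {α : Type} {p : α → Bool} (w cs : List α)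
    (hw : ∀ x ∈ w, p x) : (w ++ cs).takeWhile p = w ++ cs.takeWhile p := by
  induction w with
  | nil => rfl
  | cons a w' ih =>
    simp only [List.cons_append, List.takeWhile_cons, hw a (by simp), if_true]
    rw [ih (fun x hx => hw x (by simp [hx]))]

theorem dropWhile_all_append {α : Type} {p : α → Bool} (w cs : List α)
    (hw : ∀ x ∈ w, p x) : (w ++ cs).dropWhile p = cs.dropWhile p := by
  induction w with
  | nil => rfl
  | cons a w' ih =>
    simp only [List.cons_append, List.dropWhile_cons, hw a (by simp), if_true]
    exact ih (fun x hx => hw x (by simp [hx]))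

-- tokens of an all-letter nonempty run followed by cs
theorem tcTokens_letters (w cs : List Char) (hw : ∀ x ∈ w, tcIsLet x) (hne : w ≠ []) :
    tcTokens (w ++ cs) = (w ++ cs.takeWhile tcIsLet) :: tcTokens (cs.dropWhile tcIsLet) := by
  cases w with
  | nil => exact absurd rfl hne
  | cons c w' =>
    rw [List.cons_append, tcTokens_cons_pos c _ (hw c (by simp)),
      show w' ++ cs = (w' ++ cs : List Char) from rfl]
    rw [show (c :: (w' ++ cs)) = ((c :: w') ++ cs) from rfl,
      takeWhile_all_append _ _ hw, dropWhile_all_append _ _ hw]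

theorem size_insert_fresh (di : PySem.Dict (List Char) Int) (w : List Char) (v : Int)
    (h : di.get? w = none) : (di.insert w v).size = di.size + 1 := by
  rw [PySem.Dict.size_insert, if_neg]
  simp [(PySem.Dict.get?_eq_none_iff_contains di w).mp h]

theorem head_letter (w : List Char) (hw : ∀ x ∈ w, tcIsLet x) (hne : w ≠ []) :
    tcIsLet (w.headD ' ') = true := by
  cases w with
  | nil => exact absurd rfl hne
  | cons c w' => exact hw c (by simp)

-- main invariant: the per-line char loop of A equals tokenize+enc of B,
-- given pending letter-run w, result prefix r, and counter = size + 1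
theorem tcMain (cs : List Char) : ∀ (w : List Char) (r : List (List Char))
    (di : PySem.Dict (List Char) Int), (∀ x ∈ w, tcIsLet x) →
    tcLineA cs r w di (di.size + 1) =
      ((r ++ (tcEnc (tcTokens (w ++ cs)) di).1, (tcEnc (tcTokens (w ++ cs)) di).2,
        ((tcEnc (tcTokens (w ++ cs)) di).2.size + 1 : Int)) :
        List (List Char) × PySem.Dict (List Char) Int × Int) := by
  induction cs with
  | nil =>
    intro w r di hw
    by_cases hw0 : w = []
    · subst hw0
      simp [tcLineA, tcTokens_nil, tcEnc]
    · have ht := tcTokens_letters w [] hw hw0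
      simp only [List.takeWhile_nil, List.dropWhile_nil, List.append_nil, tcTokens_nil] at ht
      simp only [List.append_nil]
      rw [ht]
      simp only [tcLineA, if_pos hw0, tcEnc, head_letter w hw hw0, if_true]
      cases hdi : di.get? w with
      | some v => simp [tcEnc]
      | none => simp [tcEnc, size_insert_fresh di w _ hdi]
  | cons c cs ih =>
    intro w r di hw
    by_cases hc : tcIsLet c
    · rw [show tcLineA (c :: cs) r w di (di.size + 1)
            = tcLineA cs r (w ++ [c]) di (di.size + 1) by simp [tcLineA, hc]]
      rw [show w ++ c :: cs = (w ++ [c]) ++ cs by simp]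
      exact ih (w ++ [c]) r di (by intro x hx; rcases List.mem_append.mp hx with h | h
                                   · exact hw x h
                                   · simp at h; subst h; exact hc)
    · have hc' : tcIsLet c = false := by simpa using hc
      by_cases hw0 : w = []
      · subst hw0
        rw [List.nil_append, tcTokens_cons_neg c cs hc']
        simp only [tcLineA, hc', Bool.false_eq_true, if_false, ne_eq, not_true_eq_false,
          if_false, ite_self]
        rw [ih [] (r ++ [[c]]) di (by simp)]
        simp [tcEnc, hc']
      · rw [tcTokens_letters w (c :: cs) hw hw0,
          List.takeWhile_cons_of_neg (by simp [hc']), List.dropWhile_cons_of_neg (by simp [hc']),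
          List.append_nil, tcTokens_cons_neg c cs hc']
        simp only [tcLineA, hc', Bool.false_eq_true, if_false, if_pos hw0]
        cases hdi : di.get? w with
        | some v =>
          simp only [tcEnc, head_letter w hw hw0, if_true, hdi, List.headD_cons, hc',
            Bool.false_eq_true, if_false]
          rw [ih [] (r ++ [(PySem.Int.toStr v).toList, [c]]) di (by simp)]
          simp
        | none =>
          simp only [tcEnc, head_letter w hw hw0, if_true, hdi, List.headD_cons, hc',
            Bool.false_eq_true, if_false]
          rw [show ((di.size : Int) + 1 + 1 : Int)
                = ((di.insert w ((di.size : Int) + 1)).size : Int) + 1 by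
              rw [size_insert_fresh di w _ hdi]; push_cast; ring]
          rw [ih [] (r ++ [w, [c]]) (di.insert w ((di.size : Int) + 1)) (by simp)]
          simp

theorem tcOuter (ls : List (List Char)) : ∀ (di : PySem.Dict (List Char) Int),
    tcLinesA ls di (di.size + 1) = tcLinesB ls di := by
  induction ls with
  | nil => intro di; rfl
  | cons l ls ih =>
    intro di
    have h := tcMain l [] [] di (by simp)
    simp only [List.nil_append] at h
    simp only [tcLinesA, tcLinesB, h]
    rw [ih]

-- ===== VERDICT (by name: the statement is the Claim_ definition above) =====
theorem textCompression_spec : Claim_equal_textCompression := by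
  intro lines _
  unfold Spec_textCompression textCompression textCompression_alt
  rw [show (1 : Int) = (PySem.Dict.empty : PySem.Dict (List Char) Int).size + 1 by rfl,
    tcOuter]
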